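-- pv_equiv track=rewrite | github.com/sh00tg0a1/bkn-test | scripts/sql_direct_test.py | check_facts_against_gold
-- ===== SOURCE A (Python) =====
-- def check_facts_against_gold(qid: str, sql_details: list, gold_text: str) -> tuple[bool, str, list]:
--     """
--     检查 SQL 是否覆盖了金标答案要求查证的关键数据点
--     注意: 不强制数字完全一致（因为可能存在口径差异），只检查是否查询了正确的数据
--     返回: (是否有事实错误, 错误原因, 遗漏的数据点列表)
--     """
--     missing_checks = []
--
--     # Q06: 948-000077 - 金标要求查证 601条MRP/零PR/零PO
--     if qid == "Q06":
--         has_mrp = any("YCD2026031600000056" in d.get("sql", "") for d in sql_details)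
--         has_pr = any("purchase_request" in d.get("sql", "").lower() for d in sql_details)
--         has_po = any("purchase_order" in d.get("sql", "").lower() for d in sql_details)
--         if not has_mrp:
--             missing_checks.append("未查询948的MRP")
--         if not has_pr:
--             missing_checks.append("未查询948的PR")
--         if not has_po:
--             missing_checks.append("未查询948的PO")
--
--     # Q14: 两个产品物料采购 - 金标要求查证T01+948的外购件规模
--     if qid == "Q14":
--         has_t01 = any("YCD2026022800000048" in d.get("sql", "") for d in sql_details)
--         has_948 = any("YCD2026031600000056" in d.get("sql", "") for d in sql_details)
--         if not has_t01:
--             missing_checks.append("未查询T01外购件")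
--         if not has_948:
--             missing_checks.append("未查询948外购件")
--
--     # Q46: MRP 22条 vs 8条活跃 - 金标要求查证总数和活跃数
--     if qid == "Q46":
--         has_t01_mrp = any("YCD2026022800000048" in d.get("sql", "") for d in sql_details)
--         if not has_t01_mrp:
--             missing_checks.append("未查询T01的MRP")
--
--     if missing_checks:
--         return True, "数据覆盖不足: " + "; ".join(missing_checks), missing_checks
--     return False, "", []
-- ===== SOURCE B (Python) =====
-- def check_facts_against_gold(qid: str, sql_details: list, gold_text: str) -> tuple[bool, str, list]:
--     # Single pass over sql_details accumulating all four token flags at once,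
--     # instead of A's repeated any(...) scans per check.
--     f56 = f48 = fpr = fpo = False
--     for d in sql_details:
--         s = d.get("sql", "")
--         sl = s.lower()
--         f56 = f56 or "YCD2026031600000056" in s
--         f48 = f48 or "YCD2026022800000048" in s
--         fpr = fpr or "purchase_request" in sl
--         fpo = fpo or "purchase_order" in sl
--     if qid == "Q06":
--         missing_checks = [m for ok, m in ((f56, "未查询948的MRP"), (fpr, "未查询948的PR"), (fpo, "未查询948的PO")) if not ok]
--     elif qid == "Q14":
--         missing_checks = [m for ok, m in ((f48, "未查询T01外购件"), (f56, "未查询948外购件")) if not ok]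
--     elif qid == "Q46":
--         missing_checks = [] if f48 else ["未查询T01的MRP"]
--     else:
--         missing_checks = []
--     if missing_checks:
--         return True, "数据覆盖不足: " + "; ".join(missing_checks), missing_checks
--     return False, "", []
-- ===== Notes on version B (the rewrite author's own statement) =====
-- stated objective: alternative
-- what changed: B makes ONE pass over sql_details accumulating all four token flags (two product codes on the raw sql, two table names on the lowercased sql) in a single loop, then dispatches on qid to select the missing messages from those flags, instead of A's per-qid blocks each re-scanning the whole list with separate any(...) passes.
import Mathlib
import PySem

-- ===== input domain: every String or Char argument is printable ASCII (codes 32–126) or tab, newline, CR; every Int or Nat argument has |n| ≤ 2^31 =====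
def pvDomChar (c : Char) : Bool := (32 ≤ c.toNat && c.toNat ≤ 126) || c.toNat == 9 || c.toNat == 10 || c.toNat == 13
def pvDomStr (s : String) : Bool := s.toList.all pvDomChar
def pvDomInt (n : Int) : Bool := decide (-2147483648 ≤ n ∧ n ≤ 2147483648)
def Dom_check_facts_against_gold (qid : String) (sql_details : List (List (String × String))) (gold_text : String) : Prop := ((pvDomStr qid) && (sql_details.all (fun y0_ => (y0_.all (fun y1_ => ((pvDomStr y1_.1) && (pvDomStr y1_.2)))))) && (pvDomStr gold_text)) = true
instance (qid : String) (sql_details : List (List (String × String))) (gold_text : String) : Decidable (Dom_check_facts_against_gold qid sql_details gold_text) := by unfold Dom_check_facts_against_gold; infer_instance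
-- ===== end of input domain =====

-- B makes a single pass over sql_details accumulating all four token flags, then
-- dispatches on qid, instead of A's per-qid blocks of separate any(...) scans;
-- objective: alternative decomposition, same cost.

-- ===== PORT A =====
def check_facts_against_gold (qid : String) (sql_details : List (List (String × String))) (gold_text : String) : Bool × String × List String :=
  let missing_checks : List String := []
  let missing_checks :=
    if qid == "Q06" then
      let has_mrp := sql_details.any (fun d => PySem.Str.isIn "YCD2026031600000056" (PySem.Dict.getD (PySem.Dict.mk d) "sql" ""))
      let has_pr := sql_details.any (fun d => PySem.Str.isIn "purchase_request" (PySem.Str.lower (PySem.Dict.getD (PySem.Dict.mk d) "sql" "")))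
      let has_po := sql_details.any (fun d => PySem.Str.isIn "purchase_order" (PySem.Str.lower (PySem.Dict.getD (PySem.Dict.mk d) "sql" "")))
      let missing_checks := if !has_mrp then missing_checks ++ ["未查询948的MRP"] else missing_checks
      let missing_checks := if !has_pr then missing_checks ++ ["未查询948的PR"] else missing_checks
      if !has_po then missing_checks ++ ["未查询948的PO"] else missing_checks
    else missing_checks
  let missing_checks :=
    if qid == "Q14" then
      let has_t01 := sql_details.any (fun d => PySem.Str.isIn "YCD2026022800000048" (PySem.Dict.getD (PySem.Dict.mk d) "sql" ""))
      let has_948 := sql_details.any (fun d => PySem.Str.isIn "YCD2026031600000056" (PySem.Dict.getD (PySem.Dict.mk d) "sql" ""))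
      let missing_checks := if !has_t01 then missing_checks ++ ["未查询T01外购件"] else missing_checks
      if !has_948 then missing_checks ++ ["未查询948外购件"] else missing_checks
    else missing_checks
  let missing_checks :=
    if qid == "Q46" then
      let has_t01_mrp := sql_details.any (fun d => PySem.Str.isIn "YCD2026022800000048" (PySem.Dict.getD (PySem.Dict.mk d) "sql" ""))
      if !has_t01_mrp then missing_checks ++ ["未查询T01的MRP"] else missing_checks
    else missing_checks
  if missing_checks != [] then
    (true, "数据覆盖不足: " ++ PySem.Str.join "; " missing_checks, missing_checks)
  else (false, "", [])

-- ===== PORT B =====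
def check_facts_against_gold_alt (qid : String) (sql_details : List (List (String × String))) (gold_text : String) : Bool × String × List String :=
  -- single pass: accumulate the four token flags over all sql strings
  let flags : Bool × Bool × Bool × Bool := sql_details.foldl (fun acc d =>
      let s := PySem.Dict.getD (PySem.Dict.mk d) "sql" ""
      let sl := PySem.Str.lower s
      (acc.1 || PySem.Str.isIn "YCD2026031600000056" s,
       acc.2.1 || PySem.Str.isIn "YCD2026022800000048" s,
       acc.2.2.1 || PySem.Str.isIn "purchase_request" sl,
       acc.2.2.2 || PySem.Str.isIn "purchase_order" sl)) (false, false, false, false)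
  let missing_checks : List String :=
    if qid == "Q06" then
      [(flags.1, "未查询948的MRP"), (flags.2.2.1, "未查询948的PR"), (flags.2.2.2, "未查询948的PO")].filterMap
        (fun p => if !p.1 then some p.2 else none)
    else if qid == "Q14" then
      [(flags.2.1, "未查询T01外购件"), (flags.1, "未查询948外购件")].filterMap
        (fun p => if !p.1 then some p.2 else none)
    else if qid == "Q46" then
      if flags.2.1 then [] else ["未查询T01的MRP"]
    else []
  if missing_checks != [] then
    (true, "数据覆盖不足: " ++ PySem.Str.join "; " missing_checks, missing_checks)
  else (false, "", [])

-- ===== PRECONDITION & SPEC =====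
def Spec_check_facts_against_gold (qid : String) (sql_details : List (List (String × String))) (gold_text : String) (out : Bool × String × List String) : Prop := out = check_facts_against_gold_alt qid sql_details gold_text
instance (qid : String) (sql_details : List (List (String × String))) (gold_text : String) (out : Bool × String × List String) : Decidable (Spec_check_facts_against_gold qid sql_details gold_text out) := by unfold Spec_check_facts_against_gold; infer_instance

-- ===== CLAIM (what is proved, stated in full; the proofs are below) =====
def Claim_equal_check_facts_against_gold : Prop := ∀ (qid : String) (sql_details : List (List (String × String))) (gold_text : String), Dom_check_facts_against_gold qid sql_details gold_text → Spec_check_facts_against_gold qid sql_details gold_text (check_facts_against_gold qid sql_details gold_text)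

-- ===== LEMMAS AND PROOFS =====
-- the single accumulating fold computes the four any-scans of A
theorem cfag_fold_flags (l : List (List (String × String))) (a b c e : Bool) :
    l.foldl (fun acc d =>
      let s := PySem.Dict.getD (PySem.Dict.mk d) "sql" ""
      let sl := PySem.Str.lower s
      (acc.1 || PySem.Str.isIn "YCD2026031600000056" s,
       acc.2.1 || PySem.Str.isIn "YCD2026022800000048" s,
       acc.2.2.1 || PySem.Str.isIn "purchase_request" sl,
       acc.2.2.2 || PySem.Str.isIn "purchase_order" sl)) (a, b, c, e) =
    (a || l.any (fun d => PySem.Str.isIn "YCD2026031600000056" (PySem.Dict.getD (PySem.Dict.mk d) "sql" "")),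
     b || l.any (fun d => PySem.Str.isIn "YCD2026022800000048" (PySem.Dict.getD (PySem.Dict.mk d) "sql" "")),
     c || l.any (fun d => PySem.Str.isIn "purchase_request" (PySem.Str.lower (PySem.Dict.getD (PySem.Dict.mk d) "sql" ""))),
     e || l.any (fun d => PySem.Str.isIn "purchase_order" (PySem.Str.lower (PySem.Dict.getD (PySem.Dict.mk d) "sql" "")))) := by
  induction l generalizing a b c e with
  | nil => simp
  | cons hd tl ih =>
    simp only [List.foldl_cons, List.any_cons, ih, Bool.or_assoc]

theorem cfag_eq06 (sql_details : List (List (String × String))) (gold_text : String) :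
    check_facts_against_gold "Q06" sql_details gold_text = check_facts_against_gold_alt "Q06" sql_details gold_text := by
  unfold check_facts_against_gold check_facts_against_gold_alt
  simp only [cfag_fold_flags, Bool.false_or]
  generalize (sql_details.any fun d => PySem.Str.isIn "YCD2026031600000056" (PySem.Dict.getD (PySem.Dict.mk d) "sql" "")) = b1
  generalize (sql_details.any fun d => PySem.Str.isIn "YCD2026022800000048" (PySem.Dict.getD (PySem.Dict.mk d) "sql" "")) = b2
  generalize (sql_details.any fun d => PySem.Str.isIn "purchase_request" (PySem.Str.lower (PySem.Dict.getD (PySem.Dict.mk d) "sql" ""))) = b3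
  generalize (sql_details.any fun d => PySem.Str.isIn "purchase_order" (PySem.Str.lower (PySem.Dict.getD (PySem.Dict.mk d) "sql" ""))) = b4
  cases b1 <;> cases b2 <;> cases b3 <;> cases b4 <;> rfl

theorem cfag_eq14 (sql_details : List (List (String × String))) (gold_text : String) :
    check_facts_against_gold "Q14" sql_details gold_text = check_facts_against_gold_alt "Q14" sql_details gold_text := by
  unfold check_facts_against_gold check_facts_against_gold_alt
  simp only [cfag_fold_flags, Bool.false_or]
  generalize (sql_details.any fun d => PySem.Str.isIn "YCD2026031600000056" (PySem.Dict.getD (PySem.Dict.mk d) "sql" "")) = b1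
  generalize (sql_details.any fun d => PySem.Str.isIn "YCD2026022800000048" (PySem.Dict.getD (PySem.Dict.mk d) "sql" "")) = b2
  generalize (sql_details.any fun d => PySem.Str.isIn "purchase_request" (PySem.Str.lower (PySem.Dict.getD (PySem.Dict.mk d) "sql" ""))) = b3
  generalize (sql_details.any fun d => PySem.Str.isIn "purchase_order" (PySem.Str.lower (PySem.Dict.getD (PySem.Dict.mk d) "sql" ""))) = b4
  cases b1 <;> cases b2 <;> cases b3 <;> cases b4 <;> rfl

theorem cfag_eq46 (sql_details : List (List (String × String))) (gold_text : String) :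
    check_facts_against_gold "Q46" sql_details gold_text = check_facts_against_gold_alt "Q46" sql_details gold_text := by
  unfold check_facts_against_gold check_facts_against_gold_alt
  simp only [cfag_fold_flags, Bool.false_or]
  generalize (sql_details.any fun d => PySem.Str.isIn "YCD2026031600000056" (PySem.Dict.getD (PySem.Dict.mk d) "sql" "")) = b1
  generalize (sql_details.any fun d => PySem.Str.isIn "YCD2026022800000048" (PySem.Dict.getD (PySem.Dict.mk d) "sql" "")) = b2
  generalize (sql_details.any fun d => PySem.Str.isIn "purchase_request" (PySem.Str.lower (PySem.Dict.getD (PySem.Dict.mk d) "sql" ""))) = b3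
  generalize (sql_details.any fun d => PySem.Str.isIn "purchase_order" (PySem.Str.lower (PySem.Dict.getD (PySem.Dict.mk d) "sql" ""))) = b4
  cases b1 <;> cases b2 <;> cases b3 <;> cases b4 <;> rfl

theorem cfag_eq_other (qid : String) (sql_details : List (List (String × String))) (gold_text : String)
    (h06 : ¬ qid = "Q06") (h14 : ¬ qid = "Q14") (h46 : ¬ qid = "Q46") :
    check_facts_against_gold qid sql_details gold_text = check_facts_against_gold_alt qid sql_details gold_text := by
  simp [check_facts_against_gold, check_facts_against_gold_alt, h06, h14, h46]

theorem cfag_eq (qid : String) (sql_details : List (List (String × String))) (gold_text : String) :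
    check_facts_against_gold qid sql_details gold_text = check_facts_against_gold_alt qid sql_details gold_text := by
  by_cases h06 : qid = "Q06"
  · exact h06 ▸ cfag_eq06 sql_details gold_text
  · by_cases h14 : qid = "Q14"
    · exact h14 ▸ cfag_eq14 sql_details gold_text
    · by_cases h46 : qid = "Q46"
      · exact h46 ▸ cfag_eq46 sql_details gold_text
      · exact cfag_eq_other qid sql_details gold_text h06 h14 h46

-- ===== VERDICT (by name: the statement is the Claim_ definition above) =====
theorem check_facts_against_gold_spec : Claim_equal_check_facts_against_gold := by
  intro qid sql_details gold_text _
  exact cfag_eq qid sql_details gold_text
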